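-- pv_equiv track=rewrite | github.com/daniel-reich/turbo-robot | SQZoHFDfizBTP4HSx_15.py | missing_alphabets
-- ===== SOURCE A (Python) =====
-- def missing_alphabets(n):
--   c = {}
--   for x in n:
--     if c.get(x) == None:
--       c[x] = 0
--     c[x] += 1
--   t = sorted(c.values())[-1]
--   out = "".join([a*t for a in 'abcdefghijklmnopqrstuvwxyz'])
--   for x in n:
--     out = out.replace(x, '', 1)
--   return out
-- ===== SOURCE B (Python) =====
-- def missing_alphabets(n):
--   c = {}
--   for x in n:
--     c[x] = c.get(x, 0) + 1
--   t = sorted(c.values())[-1]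
--   return ''.join(a * (t - c.get(a, 0)) for a in 'abcdefghijklmnopqrstuvwxyz')
-- ===== Notes on version B (the rewrite author's own statement) =====
-- stated objective: simpler
-- what changed: B keeps the count table and t = sorted(c.values())[-1] but replaces A's build-a-26*t-character padded string plus a replace(x,'',1) pass per input character with one direct pass over the 26 letters emitting a*(t - c.get(a,0)).
-- outside the precondition, e.g. on missing_alphabets(''): A raises IndexError, B raises IndexError
import Mathlib
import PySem

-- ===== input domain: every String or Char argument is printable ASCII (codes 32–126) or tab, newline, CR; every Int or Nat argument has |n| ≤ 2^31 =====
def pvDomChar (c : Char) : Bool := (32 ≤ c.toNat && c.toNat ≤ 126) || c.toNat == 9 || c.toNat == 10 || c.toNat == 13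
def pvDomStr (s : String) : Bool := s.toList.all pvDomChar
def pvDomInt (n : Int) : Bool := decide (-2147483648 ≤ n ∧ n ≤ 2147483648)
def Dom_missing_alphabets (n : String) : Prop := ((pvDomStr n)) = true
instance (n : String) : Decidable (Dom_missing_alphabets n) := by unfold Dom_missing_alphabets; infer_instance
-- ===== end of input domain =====

-- B replaces A's build-26·t-char-string-then-remove-one-occurrence-per-input-char phase
-- by computing each letter's remaining count directly in one pass over the alphabet (simpler).

-- ===== PORT A =====
-- the literal 'abcdefghijklmnopqrstuvwxyz' both Pythons iterate over
def pvAlphabet : List Char := "abcdefghijklmnopqrstuvwxyz".toList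

-- hand port of Python  out.replace(x, '', 1)  for a single character x: remove the first
-- occurrence of x, keep the rest (exact: old is one char, new is '', count is 1)
def pvReplace1 (s : List Char) (x : Char) : List Char :=
  match s with
  | [] => []
  | y :: ys => if y = x then ys else y :: pvReplace1 ys x

def missing_alphabets (n : String) : String :=
  -- c = {}; for x in n: if c.get(x) == None: c[x] = 0; c[x] += 1
  -- (c[x] += 1 runs with x surely present, so modify with default 0 is exact)
  let c : PySem.Dict Char Int := n.toList.foldl (fun d x =>
    let d := if d.get? x = none then d.insert x 0 else d
    d.modify x 0 (· + 1)) PySem.Dict.empty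
  -- t = sorted(c.values())[-1]   (IndexError on empty n is excluded by Pre_; .getD 0 unreachable there)
  let t : Int := (PySem.List.pyGet? (PySem.List.sorted c.values (fun v => v) false) (-1)).getD 0
  -- out = "".join([a*t for a in 'abcdefghijklmnopqrstuvwxyz'])  (a*t on a 1-char string = replicate t.toNat)
  let out := PySem.Chars.join [] (pvAlphabet.map (fun a => List.replicate t.toNat a))
  -- for x in n: out = out.replace(x, '', 1)
  String.ofList (n.toList.foldl (fun out x => pvReplace1 out x) out)

-- ===== PORT B =====
def missing_alphabets_alt (n : String) : String :=
  -- c = {}; for x in n: c[x] = c.get(x, 0) + 1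
  let c : PySem.Dict Char Int := n.toList.foldl (fun d x => d.insert x (d.getD x 0 + 1)) PySem.Dict.empty
  -- t = sorted(c.values())[-1]   (IndexError on empty n is excluded by Pre_; .getD 0 unreachable there)
  let t : Int := (PySem.List.pyGet? (PySem.List.sorted c.values (fun v => v) false) (-1)).getD 0
  -- ''.join(a * (t - c.get(a, 0)) for a in 'abcdefghijklmnopqrstuvwxyz')
  String.ofList (PySem.Chars.join [] (pvAlphabet.map (fun a => List.replicate (t - c.getD a 0).toNat a)))

-- ===== PRECONDITION & SPEC =====
-- Pre_ excludes only the empty string, on which A (and B) raise IndexError at sorted(c.values())[-1]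
def Pre_missing_alphabets (n : String) : Prop := n ≠ ""
instance (n : String) : Decidable (Pre_missing_alphabets n) := by unfold Pre_missing_alphabets; infer_instance
def pvWitness_missing_alphabets : String := "banana"

def Spec_missing_alphabets (n : String) (out : String) : Prop := out = missing_alphabets_alt n
instance (n : String) (out : String) : Decidable (Spec_missing_alphabets n out) := by unfold Spec_missing_alphabets; infer_instance

-- ===== CLAIM (what is proved, stated in full; the proofs are below) =====
def Claim_equal_missing_alphabets : Prop := ∀ (n : String), Dom_missing_alphabets n → Pre_missing_alphabets n → Spec_missing_alphabets n (missing_alphabets n)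

-- ===== LEMMAS AND PROOFS =====

theorem replace1_not_mem (s : List Char) (x : Char) (h : x ∉ s) : pvReplace1 s x = s := by
  induction s with
  | nil => rfl
  | cons y ys ih => simp_all [pvReplace1]; intro hc; simp_all

theorem replace1_append (s u : List Char) (x : Char) (h : x ∉ s) :
    pvReplace1 (s ++ u) x = s ++ pvReplace1 u x := by
  induction s with
  | nil => rfl
  | cons y ys ih => simp_all [pvReplace1]; intro hc; simp_all

theorem mem_blocks {L : List Char} {m : Char → Nat} {y : Char}
    (h : y ∈ (L.map (fun a => List.replicate (m a) a)).flatten) : y ∈ L := by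
  simp only [List.mem_flatten, List.mem_map] at h
  obtain ⟨l, ⟨a, ha, rfl⟩, hy⟩ := h
  exact (List.eq_of_mem_replicate hy) ▸ ha

theorem blocks_tail_congr (L : List Char) (x : Char) (hx : x ∉ L) (m : Char → Nat) :
    (L.map (fun a => List.replicate (if a = x then m a - 1 else m a) a))
      = L.map (fun a => List.replicate (m a) a) := by
  refine List.map_congr_left (fun b hb => ?_)
  rw [if_neg ?_]; rintro rfl; exact hx hb

-- one replace(x, '', 1) on the concatenation of per-letter blocks shortens x's block by one
theorem replace1_blocks (L : List Char) (hnd : L.Nodup) (m : Char → Nat) (x : Char) :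
    pvReplace1 (L.map (fun a => List.replicate (m a) a)).flatten x
      = (L.map (fun a => List.replicate (if a = x then m a - 1 else m a) a)).flatten := by
  induction L with
  | nil => rfl
  | cons a L ih =>
    simp only [List.map_cons, List.flatten_cons]
    rcases List.nodup_cons.mp hnd with ⟨hax, hnd'⟩
    by_cases hax2 : a = x
    · subst hax2
      rw [if_pos rfl, blocks_tail_congr L a hax m]
      cases hm : m a with
      | zero =>
        simp only [List.replicate_zero, List.nil_append, Nat.zero_sub]
        exact replace1_not_mem _ _ (fun hc => hax (mem_blocks hc))
      | succ k =>
        simp [List.replicate_succ, List.cons_append, pvReplace1]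
    · rw [replace1_append _ _ _ (fun hc => hax2 (List.eq_of_mem_replicate hc).symm),
          if_neg hax2, ih hnd']

-- A's whole replace loop: every char of l removes one from its own block
theorem fold_replace_blocks (L : List Char) (hnd : L.Nodup) (l : List Char) (m : Char → Nat) :
    l.foldl (fun out x => pvReplace1 out x) (L.map (fun a => List.replicate (m a) a)).flatten
      = (L.map (fun a => List.replicate (m a - l.count a) a)).flatten := by
  induction l generalizing m with
  | nil => simp
  | cons x l ih =>
    rw [List.foldl_cons, replace1_blocks L hnd m x,
        ih (fun a => if a = x then m a - 1 else m a)]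
    congr 1
    refine List.map_congr_left (fun b hb => ?_)
    by_cases hbx : b = x
    · subst hbx
      rw [if_pos rfl, List.count_cons_self]
      congr 1
      omega
    · rw [if_neg hbx]
      congr 1
      simp [show ¬ x = b from fun h => hbx h.symm]

theorem join_nil_eq_flatten (l : List (List Char)) : PySem.Chars.join [] l = l.flatten := by
  induction l with
  | nil => rfl
  | cons a t ih =>
    cases t with
    | nil => simp [PySem.Chars.join, List.intercalate]
    | cons b u => rw [PySem.Chars.join_cons_cons]; simp_all

-- A's counter loop (ensure-present, then += 1) builds exactly collections.Counter(l)
theorem dictA_eq_counter (l : List Char) :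
    l.foldl (fun d x =>
        let d := if d.get? x = none then d.insert x 0 else d
        d.modify x 0 (· + 1)) PySem.Dict.empty
      = PySem.Dict.counter l := by
  rw [PySem.Dict.counter_eq_foldl]
  refine PySem.List.foldl_congr_mem _ _ _ _ (fun d x _ => ?_)
  by_cases h : d.get? x = none
  · simp only [h]
    simp [PySem.Dict.modify, PySem.Dict.insert_insert_self, PySem.Dict.getD_eq_get?_getD, h]
  · simp [h]

-- ===== VERDICT (by name: the statement is the Claim_ definition above) =====
theorem missing_alphabets_spec : Claim_equal_missing_alphabets := by
  intro n _ _
  unfold Spec_missing_alphabets missing_alphabets missing_alphabets_alt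
  rw [dictA_eq_counter, PySem.Dict.foldl_insert_getD_add_one_eq_counter]
  have harith : ∀ (t : Int) (k : Nat), t.toNat - k = (t - (k : Int)).toNat := by
    intro t k; omega
  simp only [join_nil_eq_flatten, fold_replace_blocks pvAlphabet (by decide),
    PySem.Dict.getD_counter, ← harith]
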